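-- pv_equiv track=rewrite | github.com/96hsjeong/algorithmStudyYJHS | Programmers/HS/2023 카카오 블라인드/표현가능한이진트리.py | solution
-- ===== SOURCE A (Python) =====
-- def solution(numbers):
--     answer = []
--
--     for number in numbers:
--         tree = list(map(int, bin(number)[2:]))
--         n = len(tree)
--
--         tree.reverse()
--         tree.extend([0] * (len(tree) - 1))
--
--         possible = 0
--
--         for mid in range(n // 2, n):
--             if tree[mid]:
--                 if check(0, 2 * mid, tree, 1):
--                     possible = 1
--                     break
--
--         answer.append(possible)
--
--     return answer
--
-- def check(start, end, tree, state):
--     # 트리의 노드 개수가 홀수가 아닌 경우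
--     if (end - start) % 2 == 1:
--         return False
--
--     # 리프 노드인 경우
--     if start == end:
--         if not state and tree[start]:
--             return False
--         return True
--
--     mid = (start + end) // 2
--
--     if tree[mid]:
--         if state:
--             return check(start, mid - 1, tree, 1) and check(mid + 1, end, tree, 1)
--         else:
--             return False
--     else:
--         return check(start, mid - 1, tree, 0) and check(mid + 1, end, tree, 0)
-- ===== SOURCE B (Python) =====
-- def solution(numbers):
--     return [full(number) for number in numbers]
--
-- def full(number):
--     # a dump must come from a nonempty tree: number 0 (and any non-positive input) has none
--     if number <= 0:
--         return 0
--     bits = list(map(int, bin(number)[2:]))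
--     size = 1
--     while size < len(bits):
--         size = 2 * size + 1
--     padded = [0] * (size - len(bits)) + bits
--     return 1 if dfs(padded) else 0
--
-- def dfs(s):
--     if len(s) == 1:
--         return True
--     mid = len(s) // 2
--     if s[mid] == 0:
--         return 1 not in s
--     return dfs(s[:mid]) and dfs(s[mid + 1:])
-- ===== Notes on version B (the rewrite author's own statement) =====
-- stated objective: simpler
-- what changed: A reverses the bit list, zero-extends it to length 2n-1 and scans all candidate roots mid in [n//2, n) with an index-and-state recursion check; B instead left-pads the binary string once to the smallest perfect length 2^k-1 and validates it with a plain recursion on sublists (a zero root forces an all-zero subtree, checked directly with '1 not in s').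
import Mathlib
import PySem

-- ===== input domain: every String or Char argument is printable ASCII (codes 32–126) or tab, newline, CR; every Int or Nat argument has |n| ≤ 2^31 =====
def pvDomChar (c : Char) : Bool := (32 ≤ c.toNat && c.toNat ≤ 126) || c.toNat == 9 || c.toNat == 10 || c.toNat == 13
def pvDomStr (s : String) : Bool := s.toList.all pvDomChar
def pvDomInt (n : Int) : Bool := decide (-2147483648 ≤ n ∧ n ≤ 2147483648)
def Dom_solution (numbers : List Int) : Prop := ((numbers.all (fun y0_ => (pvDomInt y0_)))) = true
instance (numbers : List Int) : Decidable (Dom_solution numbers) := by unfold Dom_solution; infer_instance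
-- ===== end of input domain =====

-- B replaces A's reversed-and-zero-extended flat array, index scan over candidate roots and stateful
-- index recursion by a single zero-padding to the smallest perfect length and a plain recursion on
-- sublists (objective: simpler). Equivalence is about return values; neither side mutates its input.

-- ===== PORT A =====

-- shared leaf helper: list(map(int, bin(number)[2:])); exact for number ≥ 0 (Pre_ excludes negatives, where map(int, ...) raises ValueError)
def pyBits (n : Nat) : List Int :=
  if n < 2 then [(n : Int)] else pyBits (n / 2) ++ [((n % 2 : Nat) : Int)]

-- check(start, end, tree, state); a fuel counter only makes the recursion total in Lean (every call
-- site passes fuel exceeding the recursion depth); tree[i] is ported as pyGetD because every index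
-- reached from solution's calls is in range (tree has length 2n-1 and 0 ≤ start ≤ mid ≤ end ≤ 2n-2)
def checkA (fuel : Nat) (start end_ : Int) (tree : List Int) (state : Int) : Bool :=
  match fuel with
  | 0 => false
  | f + 1 =>
    if PySem.Int.mod (end_ - start) 2 = 1 then false
    else if start = end_ then
      if state = 0 ∧ PySem.List.pyGetD tree start 0 ≠ 0 then false else true
    else if PySem.List.pyGetD tree (PySem.Int.floordiv (start + end_) 2) 0 ≠ 0 then
      if state ≠ 0 then
        checkA f start (PySem.Int.floordiv (start + end_) 2 - 1) tree 1 &&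
          checkA f (PySem.Int.floordiv (start + end_) 2 + 1) end_ tree 1
      else false
    else
      checkA f start (PySem.Int.floordiv (start + end_) 2 - 1) tree 0 &&
        checkA f (PySem.Int.floordiv (start + end_) 2 + 1) end_ tree 0

-- the 'for mid in range(n // 2, n): … break' loop, as recursion over the range list
def scanA (tree : List Int) : List Int → Int
  | [] => 0
  | mid :: rest =>
    if PySem.List.pyGetD tree mid 0 ≠ 0 && checkA ((2 * mid).toNat + 1) 0 (2 * mid) tree 1
    then 1 else scanA tree rest

def aVal (number : Int) : Int :=
  let tree0 := pyBits number.toNat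
  let n : Int := tree0.length
  let tree := tree0.reverse ++ List.replicate (tree0.length - 1) 0
  scanA tree (PySem.List.pyRange (PySem.Int.floordiv n 2) n 1)

def solution (numbers : List Int) : List Int :=
  numbers.foldl (fun answer number => answer ++ [aVal number]) []

-- ===== PORT B =====

def dfsB (s : List Int) : Bool :=
  if s.length = 1 then true
  else if PySem.List.pyGetD s ((s.length / 2 : Nat) : Int) 0 = 0 then !(s.contains 1)
  else dfsB (s.take (s.length / 2)) && dfsB (s.drop (s.length / 2 + 1))
termination_by s.length
decreasing_by
  all_goals
    rcases s with _ | ⟨a, tl⟩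
    · simp [PySem.List.pyGetD, PySem.List.pyGet?, PySem.List.pyIdx?] at *
    · simp only [List.length_take, List.length_drop, List.length_cons]; omega

-- the 'while size < len(bits): size = 2 * size + 1' loop
def growSize (size n : Nat) : Nat :=
  if size < n then growSize (2 * size + 1) n else size
termination_by n - size
decreasing_by omega

def fullB (number : Int) : Int :=
  if number ≤ 0 then 0
  else
    let bits := pyBits number.toNat
    let size := growSize 1 bits.length
    let padded := List.replicate (size - bits.length) 0 ++ bits
    if dfsB padded then 1 else 0

def solution_alt (numbers : List Int) : List Int := numbers.map fullB

-- ===== PRECONDITION & SPEC =====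
-- Pre_ excludes only inputs containing a negative number, on which A raises ValueError (bin(-5) = '-0b101' and int('b101') fails)
def Pre_solution (numbers : List Int) : Prop := ∀ x ∈ numbers, 0 ≤ x
instance (numbers : List Int) : Decidable (Pre_solution numbers) := by unfold Pre_solution; infer_instance
def pvWitness_solution : List Int := [5, 0, 7, 42]

def Spec_solution (numbers : List Int) (out : List Int) : Prop := out = solution_alt numbers
instance (numbers : List Int) (out : List Int) : Decidable (Spec_solution numbers out) := by unfold Spec_solution; infer_instance

-- ===== CLAIM (what is proved, stated in full; the proofs are below) =====
def Claim_equal_solution : Prop := ∀ (numbers : List Int), Dom_solution numbers → Pre_solution numbers → Spec_solution numbers (solution numbers)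

-- ===== LEMMAS AND PROOFS =====

-- abbreviation for the body of A's loop condition (proof-only)
def condA (t : List Int) (mid : Int) : Bool :=
  PySem.List.pyGetD t mid 0 ≠ 0 && checkA ((2 * mid).toNat + 1) 0 (2 * mid) t 1

-- check's recursion, rephrased on the segment tree[start..end] as a plain list
def chk (seg : List Int) (state : Int) : Bool :=
  if seg.length % 2 = 0 then false
  else if seg.length = 1 then !(decide (state = 0 ∧ seg.getD 0 0 ≠ 0))
  else if seg.getD (seg.length / 2) 0 ≠ 0 then
    if state ≠ 0 then chk (seg.take (seg.length / 2)) 1 && chk (seg.drop (seg.length / 2 + 1)) 1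
    else false
  else chk (seg.take (seg.length / 2)) 0 && chk (seg.drop (seg.length / 2 + 1)) 0
termination_by seg.length
decreasing_by all_goals simp only [List.length_take, List.length_drop]; omega

theorem pyBits_ne_nil (n : Nat) : pyBits n ≠ [] := by
  unfold pyBits; split <;> simp

theorem pyBits_01 (n : Nat) : ∀ x ∈ pyBits n, x = 0 ∨ x = 1 := by
  induction n using Nat.strong_induction_on with
  | _ n ih =>
    unfold pyBits
    split
    · rename_i h; intro x hx; interval_cases n <;> simp_all
    · rename_i h
      intro x hx
      rcases List.mem_append.1 hx with h1 | h2
      · exact ih (n / 2) (by omega) x h1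
      · simp at h2; omega

theorem pyBits_head (n : Nat) (hn : 1 ≤ n) : (pyBits n).getD 0 0 = 1 := by
  induction n using Nat.strong_induction_on with
  | _ n ih =>
    unfold pyBits
    split
    · rename_i h; interval_cases n <;> simp_all
    · rename_i h
      have hne := pyBits_ne_nil (n / 2)
      rcases hb : pyBits (n / 2) with _ | ⟨a, tl⟩
      · exact absurd hb hne
      · have := ih (n / 2) (by omega) (by omega)
        rw [hb] at this
        simpa using this

theorem check_eq_chk (t : List Int) :
    ∀ (d : Nat) (f : Nat) (start end_ st : Int), 0 ≤ start → start ≤ end_ → end_ < t.length →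
    (end_ - start).toNat = d → d < f →
    checkA f start end_ t st = chk ((t.drop start.toNat).take (d + 1)) st := by
  intro d
  induction d using Nat.strong_induction_on with
  | _ d ih =>
    intro f start end_ st h0 hse hlen hd hf
    rcases f with _ | f
    · omega
    have hL : ((t.drop start.toNat).take (d + 1)).length = d + 1 := by
      simp only [List.length_take, List.length_drop]
      omega
    set seg := (t.drop start.toNat).take (d + 1) with hseg
    rw [checkA]
    by_cases hodd : d % 2 = 1
    · have hm1 : PySem.Int.mod (end_ - start) 2 = 1 := by
        rw [PySem.Int.mod_eq_emod_of_pos (by omega)]; omega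
      rw [if_pos hm1, chk, if_pos (by rw [hL]; omega)]
    · have hm0 : ¬ (PySem.Int.mod (end_ - start) 2 = 1) := by
        rw [PySem.Int.mod_eq_emod_of_pos (by omega)]; omega
      rw [if_neg hm0]
      by_cases heq : start = end_
      · have hd0 : d = 0 := by omega
        subst hd0
        rw [if_pos heq]
        have hidx : start.toNat < t.length := by omega
        have hgd : PySem.List.pyGetD t start 0 = seg.getD 0 0 := by
          rw [show start = ((start.toNat : Nat) : Int) by omega, PySem.List.pyGetD_natCast]
          rw [List.getD_eq_getElem _ _ hidx, List.getD_eq_getElem _ _ (by rw [hL]; omega)]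
          simp [hseg, List.getElem_take, List.getElem_drop]
        have hrhs : chk seg st = !(decide (st = 0 ∧ seg.getD 0 0 ≠ 0)) := by
          rw [chk, if_neg (by rw [hL]; omega), if_pos (by omega)]
        rw [hrhs, hgd]
        by_cases hc : st = 0 ∧ seg.getD 0 0 ≠ 0
        · rw [if_pos hc, decide_eq_true hc]; rfl
        · rw [if_neg hc, decide_eq_false hc]; rfl
      · have hd2 : 2 ≤ d := by omega
        rw [if_neg heq]
        set m := d / 2 with hm
        have hmid : PySem.Int.floordiv (start + end_) 2 = start + m := by
          rw [PySem.Int.floordiv_eq_ediv_of_pos (by omega)]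
          omega
        rw [hmid]
        have hsm_lt : start.toNat + m < t.length := by omega
        have hgm : PySem.List.pyGetD t (start + m) 0 = seg.getD m 0 := by
          rw [show start + (m:Int) = ((start.toNat + m : Nat) : Int) by omega,
            PySem.List.pyGetD_natCast]
          rw [List.getD_eq_getElem _ _ hsm_lt, List.getD_eq_getElem _ _ (by rw [hL]; omega)]
          simp [hseg, List.getElem_take, List.getElem_drop]
        have hchildL : ∀ st' : Int, checkA f start (start + m - 1) t st' = chk (seg.take m) st' := by
          intro st'
          have e1 : m - 1 + 1 = m := by omega
          have e2 : min m (d + 1) = m := by omega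
          have h := ih (m - 1) (by omega) f start (start + m - 1) st' h0 (by omega)
            (by omega) (by omega) (by omega)
          rw [h, hseg, List.take_take, e1, e2]
        have hchildR : ∀ st' : Int, checkA f (start + m + 1) end_ t st' = chk (seg.drop (m + 1)) st' := by
          intro st'
          have h := ih (m - 1) (by omega) f (start + m + 1) end_ st' (by omega) (by omega)
            hlen (by omega) (by omega)
          rw [h, hseg, List.drop_take, List.drop_drop,
            show (start + (m:Int) + 1).toNat = start.toNat + (m + 1) by omega,
            show m - 1 + 1 = m by omega, show d + 1 - (m + 1) = m by omega]
        have hsl : seg.length / 2 = m := by rw [hL]; omega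
        have hrhs : chk seg st =
            (if seg.getD m 0 ≠ 0 then
              (if st ≠ 0 then chk (seg.take m) 1 && chk (seg.drop (m + 1)) 1 else false)
             else chk (seg.take m) 0 && chk (seg.drop (m + 1)) 0) := by
          rw [chk, if_neg (by rw [hL]; omega), if_neg (by rw [hL]; omega), hsl]
        rw [hrhs, hgm]
        by_cases hz : seg.getD m 0 ≠ 0
        · rw [if_pos hz, if_pos hz]
          by_cases hst : st ≠ 0
          · rw [if_pos hst, if_pos hst, hchildL 1, hchildR 1]
          · rw [if_neg hst, if_neg hst]
        · rw [if_neg hz, if_neg hz, hchildL 0, hchildR 0]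

theorem chk_perfect_aux : ∀ (L : Nat) (seg : List Int) (st : Int), seg.length = L →
    chk seg st = true → ∃ k, 0 < k ∧ seg.length = 2 ^ k - 1 := by
  intro L
  induction L using Nat.strong_induction_on with
  | _ L ih =>
    intro seg st hl h
    rw [chk] at h
    split at h
    · exact absurd h (by simp)
    · rename_i hodd
      split at h
      · exact ⟨1, by omega, by omega⟩
      rename_i h1
      have hlen3 : 3 ≤ seg.length := by omega
      have htl : (seg.take (seg.length / 2)).length = seg.length / 2 := by
        simp only [List.length_take]; omega
      have hchild : ∃ st', chk (seg.take (seg.length / 2)) st' = true := by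
        split at h
        · split at h
          · rw [Bool.and_eq_true] at h; exact ⟨1, h.1⟩
          · exact absurd h (by simp)
        · rw [Bool.and_eq_true] at h; exact ⟨0, h.1⟩
      obtain ⟨st', hc⟩ := hchild
      obtain ⟨j, hj, hjl⟩ := ih (seg.length / 2) (by omega) _ st' htl hc
      rw [htl] at hjl
      have h2j : 1 ≤ 2 ^ j := Nat.one_le_two_pow
      exact ⟨j + 1, by omega, by rw [pow_succ]; omega⟩

theorem chk_perfect (seg : List Int) (st : Int) (h : chk seg st = true) :
    ∃ k, 0 < k ∧ seg.length = 2 ^ k - 1 :=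
  chk_perfect_aux seg.length seg st rfl h

theorem chk_zero : ∀ (k : Nat) (seg : List Int), 0 < k → seg.length = 2 ^ k - 1 →
    (chk seg 0 = true ↔ ∀ x ∈ seg, x = 0) := by
  intro k
  induction k with
  | zero => omega
  | succ k ih =>
    intro seg hk hl
    by_cases hk0 : k = 0
    · subst hk0
      have : seg.length = 1 := by simpa using hl
      rcases seg with _ | ⟨x, _ | ⟨y, tl⟩⟩ <;> simp_all [chk]
    · have h2k : 2 ≤ 2 ^ k := by
        calc 2 = 2 ^ 1 := rfl
        _ ≤ 2 ^ k := Nat.pow_le_pow_right (by omega) (by omega)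
      have hlen : seg.length = 2 * 2 ^ k - 1 := by rw [hl, pow_succ]; ring_nf
      have hlen3 : 3 ≤ seg.length := by omega
      have hm : seg.length / 2 = 2 ^ k - 1 := by omega
      have hm_lt : seg.length / 2 < seg.length := by omega
      rw [chk, if_neg (by omega), if_neg (by omega)]
      have hd : seg.getD (seg.length / 2) 0 = seg[seg.length / 2] := List.getD_eq_getElem seg 0 hm_lt
      have htl : (seg.take (seg.length / 2)).length = 2 ^ k - 1 := by
        simp only [List.length_take]; omega
      have hdl : (seg.drop (seg.length / 2 + 1)).length = 2 ^ k - 1 := by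
        simp only [List.length_drop]; omega
      have hmem : seg[seg.length / 2] ∈ seg := List.getElem_mem hm_lt
      by_cases hnz : seg.getD (seg.length / 2) 0 ≠ 0
      · rw [if_pos hnz, if_neg (show ¬((0:Int) ≠ 0) by omega)]
        rw [hd] at hnz
        exact iff_of_false (by simp) (fun hall => hnz (hall _ hmem))
      · rw [if_neg hnz]
        rw [hd] at hnz
        push Not at hnz
        have hz := hnz
        rw [Bool.and_eq_true, ih _ (by omega) htl, ih _ (by omega) hdl]
        constructor
        · rintro ⟨hL, hR⟩ x hx
          conv at hx => rw [← List.take_append_drop (seg.length / 2) seg,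
            List.drop_eq_getElem_cons hm_lt]
          rcases List.mem_append.1 hx with hx | hx
          · exact hL x hx
          · rcases List.mem_cons.1 hx with hx | hx
            · rw [hx]; exact hz
            · exact hR x hx
        · intro hall
          exact ⟨fun x hx => hall x (List.mem_of_mem_take hx),
                 fun x hx => hall x (List.mem_of_mem_drop hx)⟩

theorem allzero_split (seg : List Int) (hm_lt : seg.length / 2 < seg.length)
    (hz : seg[seg.length / 2] = 0) :
    (∀ x ∈ seg, x = 0) ↔
      (∀ x ∈ seg.take (seg.length / 2), x = 0) ∧ (∀ x ∈ seg.drop (seg.length / 2 + 1), x = 0) := by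
  constructor
  · intro hall
    exact ⟨fun x hx => hall x (List.mem_of_mem_take hx),
           fun x hx => hall x (List.mem_of_mem_drop hx)⟩
  · rintro ⟨hL, hR⟩ x hx
    conv at hx => rw [← List.take_append_drop (seg.length / 2) seg,
      List.drop_eq_getElem_cons hm_lt]
    rcases List.mem_append.1 hx with hx | hx
    · exact hL x hx
    · rcases List.mem_cons.1 hx with hx | hx
      · rw [hx]; exact hz
      · exact hR x hx

theorem not_contains_one (seg : List Int) (h01 : ∀ x ∈ seg, x = 0 ∨ x = 1) :
    (!seg.contains 1) = true ↔ ∀ x ∈ seg, x = 0 := by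
  simp only [Bool.not_eq_eq_eq_not, Bool.not_true, List.contains_eq_mem,
    decide_eq_false_iff_not]
  constructor
  · intro h1 x hx
    rcases h01 x hx with h | h
    · exact h
    · exact absurd (h ▸ hx) h1
  · intro hall h1
    have := hall 1 h1
    omega

theorem chk_eq_dfsB : ∀ (k : Nat) (seg : List Int), 0 < k → seg.length = 2 ^ k - 1 →
    (∀ x ∈ seg, x = 0 ∨ x = 1) → chk seg 1 = dfsB seg := by
  intro k
  induction k with
  | zero => omega
  | succ k ih =>
    intro seg hk hl h01
    by_cases hk0 : k = 0
    · subst hk0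
      have h1 : seg.length = 1 := by simpa using hl
      rw [chk, if_neg (by omega), if_pos h1, dfsB, if_pos h1]
      simp
    · have h2k : 2 ≤ 2 ^ k := by
        calc 2 = 2 ^ 1 := rfl
        _ ≤ 2 ^ k := Nat.pow_le_pow_right (by omega) (by omega)
      have hlen : seg.length = 2 * 2 ^ k - 1 := by rw [hl, pow_succ]; ring_nf
      have hlen3 : 3 ≤ seg.length := by omega
      have hm : seg.length / 2 = 2 ^ k - 1 := by omega
      have hm_lt : seg.length / 2 < seg.length := by omega
      have htl : (seg.take (seg.length / 2)).length = 2 ^ k - 1 := by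
        simp only [List.length_take]; omega
      have hdl : (seg.drop (seg.length / 2 + 1)).length = 2 ^ k - 1 := by
        simp only [List.length_drop]; omega
      have hd : seg.getD (seg.length / 2) 0 = seg[seg.length / 2] :=
        List.getD_eq_getElem seg 0 hm_lt
      have h01t : ∀ x ∈ seg.take (seg.length / 2), x = 0 ∨ x = 1 :=
        fun x hx => h01 x (List.mem_of_mem_take hx)
      have h01d : ∀ x ∈ seg.drop (seg.length / 2 + 1), x = 0 ∨ x = 1 :=
        fun x hx => h01 x (List.mem_of_mem_drop hx)
      rw [chk]
      rw [if_neg (show ¬(seg.length % 2 = 0) by omega)]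
      rw [if_neg (show ¬(seg.length = 1) by omega)]
      rw [dfsB, if_neg (show ¬(seg.length = 1) by omega)]
      rw [PySem.List.pyGetD_natCast]
      by_cases hz : seg.getD (seg.length / 2) 0 = 0
      · rw [if_neg (not_not.2 hz), if_pos hz]
        rw [Bool.eq_iff_iff, Bool.and_eq_true,
          chk_zero k _ (by omega) htl, chk_zero k _ (by omega) hdl,
          not_contains_one seg h01, allzero_split seg hm_lt (hd ▸ hz)]
      · rw [if_pos hz, if_pos (show (1:Int) ≠ 0 by omega), if_neg hz,
          ih _ (by omega) htl h01t, ih _ (by omega) hdl h01d]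

theorem dfsB_reverse : ∀ (k : Nat) (seg : List Int), 0 < k → seg.length = 2 ^ k - 1 →
    dfsB seg.reverse = dfsB seg := by
  intro k
  induction k with
  | zero => omega
  | succ k ih =>
    intro seg hk hl
    by_cases hk0 : k = 0
    · subst hk0
      have h1 : seg.length = 1 := by simpa using hl
      rcases seg with _ | ⟨x, _ | ⟨y, tl⟩⟩ <;> simp_all [dfsB]
    · have h2k : 2 ≤ 2 ^ k := by
        calc 2 = 2 ^ 1 := rfl
        _ ≤ 2 ^ k := Nat.pow_le_pow_right (by omega) (by omega)
      have hlen : seg.length = 2 * 2 ^ k - 1 := by rw [hl, pow_succ]; ring_nf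
      have hlen3 : 3 ≤ seg.length := by omega
      have hm_lt : seg.length / 2 < seg.length := by omega
      have hmr_lt : seg.length / 2 < seg.reverse.length := by
        simpa using hm_lt
      have htl : (seg.take (seg.length / 2)).length = 2 ^ k - 1 := by
        simp only [List.length_take]; omega
      have hdl : (seg.drop (seg.length / 2 + 1)).length = 2 ^ k - 1 := by
        simp only [List.length_drop]; omega
      have hget : seg.reverse.getD (seg.reverse.length / 2) 0 = seg.getD (seg.length / 2) 0 := by
        rw [List.length_reverse, List.getD_eq_getElem _ _ hmr_lt,
          List.getD_eq_getElem _ _ hm_lt, List.getElem_reverse]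
        congr 1
        omega
      have htake : seg.reverse.take (seg.reverse.length / 2) =
          (seg.drop (seg.length / 2 + 1)).reverse := by
        rw [List.length_reverse, List.take_reverse,
          show seg.length - seg.length / 2 = seg.length / 2 + 1 by omega]
      have hdrop : seg.reverse.drop (seg.reverse.length / 2 + 1) =
          (seg.take (seg.length / 2)).reverse := by
        rw [List.length_reverse, List.drop_reverse,
          show seg.length - (seg.length / 2 + 1) = seg.length / 2 by omega]
      rw [dfsB, if_neg (show ¬(seg.reverse.length = 1) by simp; omega)]
      conv_rhs => rw [dfsB]
      rw [if_neg (show ¬(seg.length = 1) by omega)]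
      rw [PySem.List.pyGetD_natCast, PySem.List.pyGetD_natCast, hget, htake, hdrop]
      by_cases hz : seg.getD (seg.length / 2) 0 = 0
      · rw [if_pos hz, if_pos hz, List.contains_reverse]
      · rw [if_neg hz, if_neg hz,
          ih _ (by omega) (by simpa using hdl), ih _ (by omega) (by simpa using htl),
          Bool.and_comm]

theorem growSize_spec (n size : Nat) (hn : 0 < n) (hs : ∃ j, 0 < j ∧ size = 2 ^ j - 1)
    (hb : size ≤ 2 * n - 1) :
    (∃ k, 0 < k ∧ growSize size n = 2 ^ k - 1) ∧ n ≤ growSize size n ∧ growSize size n ≤ 2 * n - 1 := by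
  induction size using growSize.induct n with
  | case1 size hlt ih =>
    rw [growSize, if_pos hlt]
    obtain ⟨j, hj, hsz⟩ := hs
    have h2j : 1 ≤ 2 ^ j := Nat.one_le_two_pow
    exact ih ⟨j + 1, by omega, by rw [pow_succ]; omega⟩ (by omega)
  | case2 size hlt =>
    rw [growSize, if_neg hlt]
    exact ⟨hs, by omega, hb⟩

theorem perfect_uniq (n p q : Nat) (hn : 0 < n)
    (hp : ∃ k, 0 < k ∧ p = 2 ^ k - 1) (hq : ∃ k, 0 < k ∧ q = 2 ^ k - 1)
    (h1 : n ≤ p) (h2 : p ≤ 2 * n - 1) (h3 : n ≤ q) (h4 : q ≤ 2 * n - 1) : p = q := by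
  obtain ⟨k, hk, hp⟩ := hp
  obtain ⟨l, hl, hq⟩ := hq
  rcases lt_trichotomy k l with h | h | h
  · have : 2 ^ (k + 1) ≤ 2 ^ l := Nat.pow_le_pow_right (by omega) (by omega)
    rw [pow_succ] at this; omega
  · subst h; omega
  · have : 2 ^ (l + 1) ≤ 2 ^ k := Nat.pow_le_pow_right (by omega) (by omega)
    rw [pow_succ] at this; omega

theorem scanA_eq_any (t : List Int) (mids : List Int) :
    scanA t mids = if mids.any (condA t) then 1 else 0 := by
  induction mids with
  | nil => simp [scanA]
  | cons mid rest ih =>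
    rw [scanA, List.any_cons, ih]
    have hrfl : (decide (PySem.List.pyGetD t mid 0 ≠ 0) && checkA ((2 * mid).toNat + 1) 0 (2 * mid) t 1) = condA t mid := rfl
    rw [hrfl]
    cases hc : condA t mid <;> simp

theorem aVal_eq_fullB (number : Int) (h : 0 ≤ number) : aVal number = fullB number := by
  by_cases h0 : number ≤ 0
  · have hz : number = 0 := by omega
    subst hz
    simp [aVal, fullB, pyBits, scanA, PySem.List.pyRange, PySem.Int.floordiv,
      PySem.List.pyGetD, PySem.List.pyGet?, PySem.List.pyIdx?, checkA]
  · simp only [aVal, fullB]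
    rw [if_neg h0]
    set bits := pyBits number.toNat with hbits
    set n := bits.length with hn
    set t := bits.reverse ++ List.replicate (n - 1) 0 with ht
    set L := growSize 1 n with hLdef
    set padded := List.replicate (L - n) 0 ++ bits with hpad
    rw [scanA_eq_any]
    have hbne : bits ≠ [] := hbits ▸ pyBits_ne_nil number.toNat
    have hn1 : 1 ≤ n := hn ▸ List.length_pos_of_ne_nil hbne
    have htlen : t.length = 2 * n - 1 := by
      rw [ht]; simp only [List.length_append, List.length_reverse, List.length_replicate, ← hn]
      omega
    obtain ⟨⟨K, hK1, hKL⟩, hnL, hL2n⟩ :=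
      growSize_spec n 1 (by omega) ⟨1, by omega, by norm_num⟩ (by omega)
    rw [← hLdef] at hKL hnL hL2n
    have h2K : 2 ^ K = 2 * 2 ^ (K - 1) := by
      conv_lhs => rw [show K = (K - 1) + 1 by omega]
      rw [pow_succ]; ring
    have h2K1 : 1 ≤ 2 ^ (K - 1) := Nat.one_le_two_pow
    set m0 := L / 2 with hm0def
    have hLm0 : L = 2 * m0 + 1 := by omega
    have h01t : ∀ x ∈ t, x = 0 ∨ x = 1 := by
      rw [ht]; intro x hx
      rcases List.mem_append.1 hx with hx | hx
      · exact pyBits_01 number.toNat x (hbits ▸ List.mem_reverse.1 hx)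
      · exact Or.inl (List.eq_of_mem_replicate hx)
    have hn1t : n - 1 < t.length := by omega
    have hone : t.getD (n - 1) 0 = 1 := by
      rw [ht]
      rw [List.getD_eq_getElem _ _ (by rw [← ht]; exact hn1t)]
      rw [List.getElem_append_left (by simp only [List.length_reverse, ← hn]; omega)]
      rw [List.getElem_reverse]
      have h0lt : 0 < bits.length := by omega
      have heq0 : bits[bits.length - 1 - (n - 1)] = bits[0]'h0lt := by
        congr 1; omega
      rw [heq0, ← List.getD_eq_getElem bits 0 h0lt, hbits]
      exact pyBits_head number.toNat (by omega)
    have htakeL : t.take L = bits.reverse ++ List.replicate (L - n) 0 := by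
      rw [ht, List.take_append, List.take_of_length_le (by simp only [List.length_reverse, ← hn]; omega),
        List.take_replicate]
      congr 2
      simp only [List.length_reverse, ← hn]
      omega
    have htakeLlen : (t.take L).length = L := by
      simp only [List.length_take]; omega
    have hpadrev : padded = (t.take L).reverse := by
      rw [htakeL, hpad, List.reverse_append, List.reverse_replicate, List.reverse_reverse]
    have hdfseq : dfsB padded = dfsB (t.take L) := by
      rw [hpadrev, dfsB_reverse K _ (by omega) (by rw [htakeLlen, hKL])]
    have h1mem : (1 : Int) ∈ t.take L := by
      have hlt : n - 1 < (t.take L).length := by omega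
      have hv : (t.take L)[n - 1] = 1 := by
        rw [List.getElem_take, ← List.getD_eq_getElem t 0 hn1t]
        exact hone
      exact hv ▸ List.getElem_mem hlt
    have hcond : ∀ M : Nat, 2 * M < t.length →
        condA t (M : Int) = (decide (t.getD M 0 ≠ 0) && chk (t.take (2 * M + 1)) 1) := by
      intro M hM
      unfold condA
      rw [PySem.List.pyGetD_natCast]
      congr 1
      rw [show (2 * (M : Int)) = ((2 * M : Nat) : Int) by push_cast; ring]
      rw [show (((2 * M : Nat) : Int)).toNat = 2 * M by omega]
      rw [check_eq_chk t (2 * M) (2 * M + 1) 0 ((2 * M : Nat) : Int) 1 le_rfl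
        (by exact_mod_cast Nat.zero_le _) (by exact_mod_cast hM) (by omega) (by omega)]
      norm_num
    have hroot0 : t.getD m0 0 = 0 → dfsB (t.take L) = false := by
      intro hzz
      by_cases hL1 : L = 1
      · exfalso
        have hn1' : n = 1 := by omega
        have hm00 : m0 = 0 := by omega
        rw [hm00] at hzz
        rw [hn1'] at hone
        simp only [Nat.sub_self] at hone
        omega
      · rw [dfsB, if_neg (by rw [htakeLlen]; omega)]
        have hhalf : (t.take L).length / 2 = m0 := by rw [htakeLlen]
        rw [hhalf, PySem.List.pyGetD_natCast]
        have hm0lt : m0 < t.length := by omega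
        have hm0ltL : m0 < (t.take L).length := by omega
        have hget : (t.take L).getD m0 0 = t.getD m0 0 := by
          rw [List.getD_eq_getElem _ _ hm0ltL, List.getElem_take,
            ← List.getD_eq_getElem t 0 hm0lt]
        rw [if_pos (by rw [hget]; exact hzz)]
        simp only [Bool.not_eq_false']
        simpa using h1mem
    have hfd : PySem.Int.floordiv (n : Int) 2 = ((n / 2 : Nat) : Int) := by
      exact_mod_cast PySem.Int.floordiv_natCast n 2
    suffices hs : ((PySem.List.pyRange (PySem.Int.floordiv (n : Int) 2) (n : Int) 1).any (condA t))
        = dfsB padded by rw [hs]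
    rw [Bool.eq_iff_iff, List.any_eq_true]
    constructor
    · rintro ⟨mid, hmid_mem, hcondA⟩
      obtain ⟨hge, hlt⟩ := (PySem.List.mem_pyRange_one).1 hmid_mem
      rw [hfd] at hge
      have hmidM : mid = ((mid.toNat : Nat) : Int) := by omega
      set M := mid.toNat with hMdef
      have hMrange : n / 2 ≤ M ∧ M < n := by omega
      rw [hmidM, hcond M (by omega), Bool.and_eq_true, decide_eq_true_eq] at hcondA
      obtain ⟨hnz, hchk⟩ := hcondA
      obtain ⟨k, hk1, hkperf⟩ := chk_perfect _ _ hchk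
      have hlen2M : (t.take (2 * M + 1)).length = 2 * M + 1 := by
        simp only [List.length_take]; omega
      have h2ML : 2 * M + 1 = L :=
        perfect_uniq n (2 * M + 1) L (by omega) ⟨k, hk1, by rw [← hlen2M]; exact hkperf⟩
          ⟨K, hK1, hKL⟩ (by omega) (by omega) hnL hL2n
      rw [h2ML] at hchk
      rw [hdfseq,
        ← chk_eq_dfsB K _ (by omega) (by rw [htakeLlen, hKL])
          (fun x hx => h01t x (List.mem_of_mem_take hx))]
      exact hchk
    · intro hdfs
      refine ⟨(m0 : Int), ?_, ?_⟩
      · refine (PySem.List.mem_pyRange_one).2 ⟨?_, ?_⟩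
        · rw [hfd]; exact_mod_cast (by omega : n / 2 ≤ m0)
        · exact_mod_cast (by omega : m0 < n)
      · have hnz : t.getD m0 0 ≠ 0 := by
          intro hzz
          rw [hdfseq, hroot0 hzz] at hdfs
          exact absurd hdfs (by simp)
        rw [hcond m0 (by omega), show 2 * m0 + 1 = L by omega,
          chk_eq_dfsB K _ (by omega) (by rw [htakeLlen, hKL])
            (fun x hx => h01t x (List.mem_of_mem_take hx)),
          ← hdfseq, hdfs, decide_eq_true hnz]
        rfl

-- ===== VERDICT (by name: the statement is the Claim_ definition above) =====
theorem solution_spec : Claim_equal_solution := by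
  intro numbers _ hpre
  unfold Spec_solution solution solution_alt
  rw [PySem.List.foldl_append_singleton_eq_map]
  exact List.map_congr_left fun x hx => aVal_eq_fullB x (hpre x hx)
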